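-- pv_equiv track=rewrite | github.com/rodrigocorreiaist/Fundamentos-de-Programa-o | FP2324P2.py | obtem_cadeia
-- ===== SOURCE A (Python) =====
-- def obtem_col(i):
--     """Devolve a coluna da interseção"""
--
--     return i[0]
--
-- def obtem_lin(i):
--     "Devolve a linha da interseção"
--
--     if len(i) == 3:
--         return i[1] + i[2]
--     if len(i) == 2:
--         return i[1]
--
-- def ordena_intersecoes(t):
--     """Recebe um tuplo de interseções e devolve-o de acordo com a ordem de leitura"""
--
--     def comparador(tup):
--         return tup[1], tup[0]
--
--     def comparacao(tup1, tup2):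
--         return (comparador(tup1) > comparador(tup2)) - (
--             comparador(tup1) < comparador(tup2)
--         )
--
--     tuplos_ordenados = sorted(t, key=comparador)
--     return tuple(tuplos_ordenados)
--
-- def obtem_pedra(g, i):
--     """Devolve a pedra corresponde à interseção"""
--
--     n = len(g)
--     col, linha = obtem_col(i), obtem_lin(i) - n
--     col = ord(col) - ord("A")
--     return g[col][linha - 1]
--
-- def obtem_cadeia(g, i):
--     """Devolve um tuplo formado pela cadeia de pedras que passa pela interseção i"""
--
--     def dentro_limites(v, h):
--         return 0 <= v < ncolunas and 0 <= h < nlinhas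
--
--     def vizinhos(v, h):
--         return [(v - 1, h), (v + 1, h), (v, h - 1), (v, h + 1)]
--
--     ncolunas = len(g)
--     nlinhas = len(g[0])
--
--     letra = obtem_col(i)
--     numero = obtem_lin(i)
--     v, h = ord(letra) - ord("A"), numero - 1
--
--     visitados = {(v, h)}
--     to_check = [(v, h)]
--
--     while to_check:
--         pos = to_check.pop()
--         for vizinho_v, vizinho_h in vizinhos(*pos):
--             if (
--                 dentro_limites(vizinho_v, vizinho_h)
--                 and g[vizinho_v][vizinho_h] == obtem_pedra(g, i)
--                 and (vizinho_v, vizinho_h) not in visitados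
--             ):
--                 visitados.add((vizinho_v, vizinho_h))
--                 to_check.append((vizinho_v, vizinho_h))
--
--     cadeia = [((chr(v + ord("A")), h + 1)) for v, h in sorted(visitados)]
--     return ordena_intersecoes(tuple(cadeia))
-- ===== SOURCE B (Python) =====
-- def obtem_col(i):
--     return i[0]
--
--
-- def obtem_lin(i):
--     if len(i) == 3:
--         return i[1] + i[2]
--     if len(i) == 2:
--         return i[1]
--
--
-- def ordena_intersecoes(t):
--     def comparador(tup):
--         return tup[1], tup[0]
--
--     return tuple(sorted(t, key=comparador))
--
--
-- def obtem_pedra(g, i):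
--     n = len(g)
--     col, linha = obtem_col(i), obtem_lin(i) - n
--     col = ord(col) - ord("A")
--     return g[col][linha - 1]
--
--
-- def obtem_cadeia(g, i):
--     """Round-based fixpoint: grow the visited set by whole frontiers until stable."""
--
--     ncolunas = len(g)
--     nlinhas = len(g[0])
--     v = ord(obtem_col(i)) - ord("A")
--     h = obtem_lin(i) - 1
--     visitados = {(v, h)}
--     for _ in range(ncolunas * nlinhas):
--         novos = {
--             (nv, nh)
--             for (cv, ch) in visitados
--             for (nv, nh) in ((cv - 1, ch), (cv + 1, ch), (cv, ch - 1), (cv, ch + 1))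
--             if 0 <= nv < ncolunas and 0 <= nh < nlinhas and g[nv][nh] == obtem_pedra(g, i)
--         }
--         if novos <= visitados:
--             break
--         visitados |= novos
--     cadeia = [(chr(cv + ord("A")), ch + 1) for cv, ch in sorted(visitados)]
--     return ordena_intersecoes(tuple(cadeia))
-- ===== Notes on version B (the rewrite author's own statement) =====
-- stated objective: alternative
-- what changed: B replaces A's explicit-stack worklist flood fill by a round-based fixpoint iteration: each round expands the whole visited set by every in-bounds same-colour neighbour at once and stops when a round adds nothing.
-- outside the precondition, e.g. on obtem_cadeia([[3, 3], [9, 9], [7]], ('A', 2)): A returns (('A', 1), ('A', 2)), B returns (('A', 1), ('A', 2))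
import Mathlib
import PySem

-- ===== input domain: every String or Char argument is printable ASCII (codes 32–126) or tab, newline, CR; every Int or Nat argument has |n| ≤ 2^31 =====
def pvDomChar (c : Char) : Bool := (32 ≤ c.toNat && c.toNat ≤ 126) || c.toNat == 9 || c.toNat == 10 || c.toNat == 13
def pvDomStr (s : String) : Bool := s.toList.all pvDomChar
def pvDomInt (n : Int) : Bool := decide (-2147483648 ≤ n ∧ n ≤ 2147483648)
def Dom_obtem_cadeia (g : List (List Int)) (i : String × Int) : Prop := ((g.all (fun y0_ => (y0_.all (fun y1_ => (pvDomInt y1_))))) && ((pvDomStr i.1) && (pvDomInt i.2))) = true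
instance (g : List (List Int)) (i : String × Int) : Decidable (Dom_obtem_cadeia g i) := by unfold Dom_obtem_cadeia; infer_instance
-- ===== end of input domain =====

-- B replaces A's explicit-stack flood fill by a round-based fixpoint iteration (whole-frontier
-- expansion until a round adds nothing); same return value, similar cost — objective: alternative.

-- ===== PORT A =====
-- shared module helpers (the Python file's obtem_col / obtem_lin / obtem_pedra / ordena_intersecoes)
def obtem_col (i : String × Int) : String := i.1

def obtem_lin (i : String × Int) : Int := i.2   -- the len(i) == 2 branch: i is a (str, int) pair

-- ord(s) for a length-1 string (Pre_ guarantees length 1; exact there)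
def pvOrd (s : String) : Int := ((s.toList.headD 'A').toNat : Int)

-- chr(n): exact for the codes 65 ≤ n < 0xD800 it receives here
def pvChr (n : Int) : String := String.ofList [Char.ofNat n.toNat]

-- g[a][b] with Python (possibly negative) indexing; the .getD defaults stand for IndexError, excluded by Pre_
def pvCell (g : List (List Int)) (a b : Int) : Int :=
  (PySem.List.pyGet? ((PySem.List.pyGet? g a).getD []) b).getD 0

def obtem_pedra (g : List (List Int)) (i : String × Int) : Int :=
  let n : Int := (g.length : Int)
  let col : Int := pvOrd (obtem_col i) - 65
  let linha : Int := obtem_lin i - n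
  pvCell g col (linha - 1)

def ordena_intersecoes (t : List (String × Int)) : List (String × Int) :=
  PySem.List.sorted2 t (fun tup => tup.2) (fun tup => tup.1)

-- dentro_limites / vizinhos, and the combined neighbour-eligibility test of the loop guard
def pvDentro (ncol nlin : Int) (c : Int × Int) : Bool :=
  decide (0 ≤ c.1) && decide (c.1 < ncol) && decide (0 ≤ c.2) && decide (c.2 < nlin)

def pvViz (p : Int × Int) : List (Int × Int) :=
  [(p.1 - 1, p.2), (p.1 + 1, p.2), (p.1, p.2 - 1), (p.1, p.2 + 1)]

def pvGood (g : List (List Int)) (pedra ncol nlin : Int) (c : Int × Int) : Bool :=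
  pvDentro ncol nlin c && (pvCell g c.1 c.2 == pedra)

-- the body of A's inner for-loop over the four neighbours of the popped cell
def pvStep (g : List (List Int)) (pedra ncol nlin : Int)
    (st : PySem.Set (Int × Int) × List (Int × Int)) (nb : Int × Int) :
    PySem.Set (Int × Int) × List (Int × Int) :=
  if pvGood g pedra ncol nlin nb && !(PySem.Set.contains st.1 nb)
  then (PySem.Set.add st.1 nb, st.2 ++ [nb]) else st

-- A's while-loop over the stack; fuel = ncol*nlin+1 is provably sufficient (one pop per iteration,
-- every push a fresh in-bounds cell), so the fuel-0 branch is never reached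
def pvALoop (g : List (List Int)) (i : String × Int) (ncol nlin : Int) :
    Nat → PySem.Set (Int × Int) → List (Int × Int) → PySem.Set (Int × Int)
  | 0, vis, _ => vis
  | fuel + 1, vis, stk =>
    match PySem.List.pop? stk with
    | none => vis
    | some (pos, stk') =>
      let st := (pvViz pos).foldl (pvStep g (obtem_pedra g i) ncol nlin) (vis, stk')
      pvALoop g i ncol nlin fuel st.1 st.2

def obtem_cadeia (g : List (List Int)) (i : String × Int) : List (String × Int) :=
  let ncolunas : Int := (g.length : Int)
  let nlinhas : Int := ((g.headD []).length : Int)   -- len(g[0]); empty g excluded by Pre_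
  let v : Int := pvOrd (obtem_col i) - 65
  let h : Int := obtem_lin i - 1
  let vis := pvALoop g i ncolunas nlinhas ((ncolunas * nlinhas).toNat + 1) [(v, h)] [(v, h)]
  let cadeia := (PySem.List.sorted2 vis (fun p => p.1) (fun p => p.2)).map
    (fun p => (pvChr (p.1 + 65), p.2 + 1))
  ordena_intersecoes cadeia

-- ===== PORT B =====
-- one round of B's fixpoint loop: expand by all eligible neighbours at once, flag when stable
def pvRound (g : List (List Int)) (pedra ncol nlin : Int)
    (st : PySem.Set (Int × Int) × Bool) : PySem.Set (Int × Int) × Bool :=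
  if st.2 then st
  else
    let novos : PySem.Set (Int × Int) :=
      PySem.Set.ofList ((st.1.flatMap pvViz).filter (pvGood g pedra ncol nlin))
    if PySem.Set.issubset novos st.1 then (st.1, true)
    else (PySem.Set.update st.1 novos, false)

def obtem_cadeia_alt (g : List (List Int)) (i : String × Int) : List (String × Int) :=
  let ncolunas : Int := (g.length : Int)
  let nlinhas : Int := ((g.headD []).length : Int)
  let v : Int := pvOrd (obtem_col i) - 65
  let h : Int := obtem_lin i - 1
  let st := (PySem.List.pyRange 0 (ncolunas * nlinhas) 1).foldl
    (fun st _ => pvRound g (obtem_pedra g i) ncolunas nlinhas st) ([(v, h)], false)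
  let cadeia := (PySem.List.sorted2 st.1 (fun p => p.1) (fun p => p.2)).map
    (fun p => (pvChr (p.1 + 65), p.2 + 1))
  ordena_intersecoes cadeia

-- ===== PRECONDITION & SPEC =====
-- Pre_ admits the inputs on which A provably raises no exception: a nonempty board, a one-letter
-- column, and then either a start intersection with no in-bounds neighbour (the fill probes nothing
-- and returns the start alone) or a well-formed probe: the (Python-negatively-indexable) column in
-- range, no row shorter than row 0, and obtem_pedra's wrapped row index in range.  It thereby also
-- excludes some inputs where A happens to return, e.g. ragged boards whose short rows the fill
-- never probes (a shorter row raises IndexError whenever probed, and whether it is probed is not a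
-- closed-form condition; A and B agree on such inputs).
def Pre_obtem_cadeia (g : List (List Int)) (i : String × Int) : Prop :=
  0 < g.length ∧ i.1.toList.length = 1 ∧
  ((∀ nb ∈ pvViz (pvOrd i.1 - 65, i.2 - 1),
      pvDentro (g.length : Int) ((g.headD []).length : Int) nb = false) ∨
   (-(g.length : Int) ≤ pvOrd i.1 - 65 ∧ pvOrd i.1 - 65 < (g.length : Int) ∧
    (∀ r ∈ g, ((g.headD []).length : Int) ≤ (r.length : Int)) ∧
    -((((PySem.List.pyGet? g (pvOrd i.1 - 65)).getD []).length : Int)) ≤ i.2 - (g.length : Int) - 1 ∧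
    i.2 - (g.length : Int) - 1 < (((PySem.List.pyGet? g (pvOrd i.1 - 65)).getD []).length : Int)))

instance (g : List (List Int)) (i : String × Int) : Decidable (Pre_obtem_cadeia g i) := by
  unfold Pre_obtem_cadeia; infer_instance

def pvWitness_obtem_cadeia : List (List Int) × (String × Int) := ([[0]], ("A", 1))

def Spec_obtem_cadeia (g : List (List Int)) (i : String × Int) (out : List (String × Int)) : Prop :=
  out = obtem_cadeia_alt g i

instance (g : List (List Int)) (i : String × Int) (out : List (String × Int)) :
    Decidable (Spec_obtem_cadeia g i out) := by unfold Spec_obtem_cadeia; infer_instance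

-- ===== CLAIM (what is proved, stated in full; the proofs are below) =====
def Claim_equal_obtem_cadeia : Prop :=
  ∀ (g : List (List Int)) (i : String × Int), Dom_obtem_cadeia g i → Pre_obtem_cadeia g i →
    Spec_obtem_cadeia g i (obtem_cadeia g i)

-- ===== LEMMAS AND PROOFS =====

-- the cells connected to s through eligible neighbours (s itself unconditionally)
inductive pvReach (good : Int × Int → Bool) (s : Int × Int) : Int × Int → Prop
  | base : pvReach good s s
  | step {a b : Int × Int} : pvReach good s a → b ∈ pvViz a → good b = true → pvReach good s b

def pvClosed (good : Int × Int → Bool) (V : List (Int × Int)) : Prop :=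
  ∀ x ∈ V, ∀ nb ∈ pvViz x, good nb = true → nb ∈ V

lemma pvReach_mem_of_closed {good : Int × Int → Bool} {s x : Int × Int} {V : List (Int × Int)}
    (hr : pvReach good s x) (hs : s ∈ V) (hcl : pvClosed good V) : x ∈ V := by
  induction hr with
  | base => exact hs
  | step _ hnb hg ih => exact hcl _ ih _ hnb hg

lemma pvReach_cases {good : Int × Int → Bool} {s x : Int × Int}
    (hr : pvReach good s x) : x = s ∨ good x = true := by
  cases hr with
  | base => exact Or.inl rfl
  | step _ _ hg => exact Or.inr hg

-- how many listed cells are still unvisited (the loop variant of A's while-loop)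
def pvUnvis (cells vis : List (Int × Int)) : Nat :=
  (cells.filter (fun c => decide (c ∉ vis))).length

lemma pvUnvis_le (cells vis : List (Int × Int)) : pvUnvis cells vis ≤ cells.length :=
  List.length_filter_le _ _

lemma pvUnvis_add {cells vis : List (Int × Int)} {nb : Int × Int} (hcn : cells.Nodup)
    (hmem : nb ∈ cells) (hnv : nb ∉ vis) :
    pvUnvis cells (PySem.Set.add vis nb) + 1 = pvUnvis cells vis := by
  unfold pvUnvis
  rw [PySem.Set.add_of_not_mem hnv]
  have h1 : (fun c : Int × Int => decide (c ∉ vis ++ [nb]))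
      = fun c => decide (c ∉ vis) && (c != nb) := by
    funext c; by_cases h1 : c ∈ vis <;> by_cases h2 : c = nb <;> simp [h1, h2]
  rw [h1, ← List.filter_filter, List.filter_comm]
  have hLn : (cells.filter (fun c => decide (c ∉ vis))).Nodup := hcn.filter _
  have hnbL : nb ∈ cells.filter (fun c => decide (c ∉ vis)) :=
    List.mem_filter.mpr ⟨hmem, by simp [hnv]⟩
  rw [← List.Nodup.erase_eq_filter hLn nb, List.length_erase_of_mem hnbL]
  have := List.length_pos_of_mem hnbL
  omega

-- a nodup list is no longer than any list containing it
lemma pvNodup_length_le {l m : List (Int × Int)} (h : l.Nodup) (hs : l ⊆ m) :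
    l.length ≤ m.length := by
  calc l.length = l.toFinset.card := (List.toFinset_card_of_nodup h).symm
  _ ≤ m.toFinset.card := Finset.card_le_card (fun x hx => by
      simp only [List.mem_toFinset] at *; exact hs hx)
  _ ≤ m.length := m.toFinset_card_le

-- one pass of A's inner for-loop over the neighbours of a popped cell
lemma pvFold_prop (g : List (List Int)) (pedra ncol nlin : Int) (cells : List (Int × Int))
    (hcn : cells.Nodup) (hc : ∀ c, pvGood g pedra ncol nlin c = true → c ∈ cells) :
    ∀ (l : List (Int × Int)) (vis stk : List (Int × Int)), vis.Nodup →
    (∀ x ∈ vis, x ∈ (l.foldl (pvStep g pedra ncol nlin) (vis, stk)).1) ∧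
    (∀ x ∈ (l.foldl (pvStep g pedra ncol nlin) (vis, stk)).1,
      x ∈ vis ∨ (x ∈ l ∧ pvGood g pedra ncol nlin x = true)) ∧
    (∀ nb ∈ l, pvGood g pedra ncol nlin nb = true →
      nb ∈ (l.foldl (pvStep g pedra ncol nlin) (vis, stk)).1) ∧
    (∀ x ∈ stk, x ∈ (l.foldl (pvStep g pedra ncol nlin) (vis, stk)).2) ∧
    (∀ x ∈ (l.foldl (pvStep g pedra ncol nlin) (vis, stk)).2,
      x ∈ stk ∨ (x ∈ (l.foldl (pvStep g pedra ncol nlin) (vis, stk)).1 ∧ x ∉ vis)) ∧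
    (∀ x ∈ (l.foldl (pvStep g pedra ncol nlin) (vis, stk)).1,
      x ∉ vis → x ∈ (l.foldl (pvStep g pedra ncol nlin) (vis, stk)).2) ∧
    (l.foldl (pvStep g pedra ncol nlin) (vis, stk)).1.Nodup ∧
    ((l.foldl (pvStep g pedra ncol nlin) (vis, stk)).2.length
      + pvUnvis cells (l.foldl (pvStep g pedra ncol nlin) (vis, stk)).1
      ≤ stk.length + pvUnvis cells vis) := by
  intro l
  induction l with
  | nil =>
    intro vis stk hv
    refine ⟨fun x hx => hx, fun x hx => Or.inl hx, by simp, fun x hx => hx,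
      fun x hx => Or.inl hx, fun x hx hnx => absurd hx hnx, hv, le_refl _⟩
  | cons nb t ih =>
    intro vis stk hv
    rw [List.foldl_cons]
    by_cases hg : (pvGood g pedra ncol nlin nb && !(PySem.Set.contains vis nb)) = true
    · have hnv : nb ∉ vis := by
        have := (Bool.and_eq_true_iff.mp hg).2
        simpa [PySem.Set.contains_iff] using this
      have hgood : pvGood g pedra ncol nlin nb = true := (Bool.and_eq_true_iff.mp hg).1
      have hstep : pvStep g pedra ncol nlin (vis, stk) nb
          = (PySem.Set.add vis nb, stk ++ [nb]) := by simp only [pvStep]; rw [if_pos hg]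
      rw [hstep]
      obtain ⟨i1, i2, i3, i4, i5, i6, i7, i8⟩ :=
        ih (PySem.Set.add vis nb) (stk ++ [nb]) (PySem.Set.nodup_add vis nb hv)
      have hmemadd : nb ∈ PySem.Set.add vis nb := (PySem.Set.mem_add _ _ _).mpr (Or.inr rfl)
      refine ⟨?_, ?_, ?_, ?_, ?_, ?_, i7, ?_⟩
      · exact fun x hx => i1 x ((PySem.Set.mem_add _ _ _).mpr (Or.inl hx))
      · intro x hx
        rcases i2 x hx with h | ⟨ht, hgx⟩
        · rcases (PySem.Set.mem_add _ _ _).mp h with h' | h'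
          · exact Or.inl h'
          · exact Or.inr ⟨by simp [h'], h' ▸ hgood⟩
        · exact Or.inr ⟨List.mem_cons_of_mem _ ht, hgx⟩
      · intro nb' hnb' hg'
        rcases List.mem_cons.mp hnb' with h | h
        · exact h ▸ i1 _ hmemadd
        · exact i3 _ h hg'
      · exact fun x hx => i4 x (List.mem_append_left _ hx)
      · intro x hx
        rcases i5 x hx with h | ⟨h1, h2⟩
        · rcases List.mem_append.mp h with h' | h'
          · exact Or.inl h'
          · have : x = nb := by simpa using h'
            exact Or.inr ⟨i1 _ (this ▸ hmemadd), this ▸ hnv⟩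
        · refine Or.inr ⟨h1, fun hxv => h2 ((PySem.Set.mem_add _ _ _).mpr (Or.inl hxv))⟩
      · intro x hx hxv
        by_cases hxa : x ∈ PySem.Set.add vis nb
        · have : x = nb := ((PySem.Set.mem_add _ _ _).mp hxa).resolve_left hxv
          exact i4 _ (this ▸ List.mem_append_right _ (List.mem_singleton_self _))
        · exact i6 x hx hxa
      · have := pvUnvis_add hcn (hc nb hgood) hnv (cells := cells) (vis := vis)
        have h8 := i8
        simp only [List.length_append, List.length_singleton] at h8 ⊢
        omega
    · have hstep : pvStep g pedra ncol nlin (vis, stk) nb = (vis, stk) := by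
        simp only [pvStep]; rw [if_neg hg]
      rw [hstep]
      obtain ⟨i1, i2, i3, i4, i5, i6, i7, i8⟩ := ih vis stk hv
      refine ⟨i1, ?_, ?_, i4, i5, i6, i7, i8⟩
      · intro x hx
        rcases i2 x hx with h | ⟨ht, hgx⟩
        · exact Or.inl h
        · exact Or.inr ⟨List.mem_cons_of_mem _ ht, hgx⟩
      · intro nb' hnb' hg'
        rcases List.mem_cons.mp hnb' with h | h
        · subst h
          by_cases hcont : PySem.Set.contains vis nb' = true
          · exact i1 _ ((PySem.Set.contains_iff _ _).mp hcont)
          · have hcf : PySem.Set.contains vis nb' = false := Bool.eq_false_iff.mpr hcont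
            exact absurd (by rw [hg', hcf]; rfl :
              (pvGood g pedra ncol nlin nb' && !(PySem.Set.contains vis nb')) = true) hg
        · exact i3 _ h hg'

lemma pvALoop_main (g : List (List Int)) (i : String × Int) (ncol nlin : Int)
    (cells : List (Int × Int)) (hcn : cells.Nodup)
    (hc : ∀ c, pvGood g (obtem_pedra g i) ncol nlin c = true → c ∈ cells) (s : Int × Int) :
    ∀ (fuel : Nat) (vis stk : List (Int × Int)), vis.Nodup →
    (∀ x ∈ stk, x ∈ vis) →
    (∀ x ∈ vis, pvReach (pvGood g (obtem_pedra g i) ncol nlin) s x) →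
    (∀ x ∈ vis, x ∉ stk → ∀ nb ∈ pvViz x, pvGood g (obtem_pedra g i) ncol nlin nb = true → nb ∈ vis) →
    stk.length + pvUnvis cells vis ≤ fuel →
    (∀ x ∈ vis, x ∈ pvALoop g i ncol nlin fuel vis stk) ∧
    (∀ x ∈ pvALoop g i ncol nlin fuel vis stk, pvReach (pvGood g (obtem_pedra g i) ncol nlin) s x) ∧
    (pvALoop g i ncol nlin fuel vis stk).Nodup ∧
    pvClosed (pvGood g (obtem_pedra g i) ncol nlin) (pvALoop g i ncol nlin fuel vis stk) := by
  intro fuel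
  induction fuel with
  | zero =>
    intro vis stk hv hstk hre hcl hfuel
    have hnil : stk = [] := List.length_eq_zero_iff.mp (by omega)
    subst hnil
    exact ⟨fun x hx => hx, hre, hv, fun x hx nb hnb hg => hcl x hx (by simp) nb hnb hg⟩
  | succ fuel ih =>
    intro vis stk hv hstk hre hcl hfuel
    rcases eq_or_ne stk [] with hnil | hne
    · subst hnil
      simp only [pvALoop]
      exact ⟨fun x hx => hx, hre, hv, fun x hx nb hnb hg => hcl x hx (by simp) nb hnb hg⟩
    · obtain ⟨pos, stk', hpop⟩ : ∃ pos stk', stk = stk' ++ [pos] :=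
        ⟨stk.getLast hne, stk.dropLast, (List.dropLast_append_getLast hne).symm⟩
      subst hpop
      have hloop : pvALoop g i ncol nlin (fuel + 1) vis (stk' ++ [pos])
          = pvALoop g i ncol nlin fuel
            ((pvViz pos).foldl (pvStep g (obtem_pedra g i) ncol nlin) (vis, stk')).1
            ((pvViz pos).foldl (pvStep g (obtem_pedra g i) ncol nlin) (vis, stk')).2 := by
        simp only [pvALoop, PySem.List.pop?_last]
      obtain ⟨f1, f2, f3, f4, f5, f6, f7, f8⟩ :=
        pvFold_prop g (obtem_pedra g i) ncol nlin cells hcn hc (pvViz pos) vis stk' hv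
      have hpos_vis : pos ∈ vis := hstk pos (by simp)
      obtain ⟨m1, m2, m3, m4⟩ := ih
        ((pvViz pos).foldl (pvStep g (obtem_pedra g i) ncol nlin) (vis, stk')).1
        ((pvViz pos).foldl (pvStep g (obtem_pedra g i) ncol nlin) (vis, stk')).2
        f7
        (by
          intro x hx
          rcases f5 x hx with h | ⟨h1, _⟩
          · exact f1 x (hstk x (by simp [h]))
          · exact h1)
        (by
          intro x hx
          rcases f2 x hx with h | ⟨hviz, hg⟩
          · exact hre x h
          · exact pvReach.step (hre pos hpos_vis) hviz hg)
        (by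
          intro x hx hnstk nb hnb hg
          by_cases hxv : x ∈ vis
          · by_cases hxpos : x = pos
            · exact f3 nb (hxpos ▸ hnb) hg
            · have hxnstk' : x ∉ stk' := fun hmem => hnstk (f4 x hmem)
              have hxnstk : x ∉ stk' ++ [pos] := by simp [hxnstk', hxpos]
              exact f1 nb (hcl x hxv hxnstk nb hnb hg)
          · exact absurd (f6 x hx hxv) hnstk)
        (by
          have hlen : (stk' ++ [pos]).length = stk'.length + 1 := by simp
          omega)
      rw [hloop]
      exact ⟨fun x hx => m1 x (f1 x hx), m2, m3, m4⟩

lemma pvALoop_char (g : List (List Int)) (i : String × Int) (ncol nlin : Int)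
    (cells : List (Int × Int)) (hcn : cells.Nodup)
    (hc : ∀ c, pvGood g (obtem_pedra g i) ncol nlin c = true → c ∈ cells) (s : Int × Int)
    (fuel : Nat) (hf : cells.length + 1 ≤ fuel) :
    (pvALoop g i ncol nlin fuel [s] [s]).Nodup ∧
    (∀ x, x ∈ pvALoop g i ncol nlin fuel [s] [s] ↔
      pvReach (pvGood g (obtem_pedra g i) ncol nlin) s x) := by
  obtain ⟨m1, m2, m3, m4⟩ := pvALoop_main g i ncol nlin cells hcn hc s fuel [s] [s]
    (by simp) (fun x hx => hx) (by intro x hx; rw [List.mem_singleton.mp hx]; exact pvReach.base)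
    (by intro x hx hnx; exact absurd hx hnx)
    (by have := pvUnvis_le cells [s]; simp only [List.length_singleton]; omega)
  exact ⟨m3, fun x => ⟨m2 x, fun hr => pvReach_mem_of_closed hr (m1 s (by simp)) m4⟩⟩

-- B-side invariants
def pvBInv (good : Int × Int → Bool) (s : Int × Int) (st : PySem.Set (Int × Int) × Bool) : Prop :=
  st.1.Nodup ∧ s ∈ st.1 ∧ (∀ x ∈ st.1, pvReach good s x) ∧ (st.2 = true → pvClosed good st.1)

lemma pvRound_of_done {g : List (List Int)} {pedra ncol nlin : Int}
    {st : PySem.Set (Int × Int) × Bool}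
    (h : st.2 = true) : pvRound g pedra ncol nlin st = st := by
  unfold pvRound; rw [h]; simp

lemma pvRound_inv {g : List (List Int)} {pedra ncol nlin : Int} {s : Int × Int}
    {st : PySem.Set (Int × Int) × Bool}
    (h : pvBInv (pvGood g pedra ncol nlin) s st) :
    pvBInv (pvGood g pedra ncol nlin) s (pvRound g pedra ncol nlin st) ∧
    (∀ x ∈ st.1, x ∈ (pvRound g pedra ncol nlin st).1) := by
  obtain ⟨hnd, hs, hre, hfl⟩ := h
  by_cases hdone : st.2 = true
  · rw [pvRound_of_done hdone]
    exact ⟨⟨hnd, hs, hre, hfl⟩, fun x hx => hx⟩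
  · have hd : st.2 = false := Bool.eq_false_iff.mpr hdone
    unfold pvRound
    rw [hd]
    simp only [Bool.false_eq_true, if_false]
    by_cases hsub : PySem.Set.issubset
        (PySem.Set.ofList ((st.1.flatMap pvViz).filter (pvGood g pedra ncol nlin))) st.1 = true
    · rw [if_pos hsub]
      refine ⟨⟨hnd, hs, hre, fun _ => ?_⟩, fun x hx => hx⟩
      intro x hx nb hnb hg
      have hmemf : nb ∈ (st.1.flatMap pvViz).filter (pvGood g pedra ncol nlin) :=
        List.mem_filter.mpr ⟨List.mem_flatMap.mpr ⟨x, hx, hnb⟩, hg⟩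
      exact (PySem.Set.issubset_iff _ _).mp hsub nb ((PySem.Set.mem_ofList _ _).mpr hmemf)
    · rw [if_neg hsub]
      refine ⟨⟨PySem.Set.nodup_update _ _ hnd, (PySem.Set.mem_update _ _ _).mpr (Or.inl hs), ?_,
        by simp⟩, fun x hx => (PySem.Set.mem_update _ _ _).mpr (Or.inl hx)⟩
      intro x hx
      rcases (PySem.Set.mem_update _ _ _).mp hx with hold | hnew
      · exact hre x hold
      · have := (PySem.Set.mem_ofList _ _).mp hnew
        obtain ⟨hfm, hg⟩ := List.mem_filter.mp this
        obtain ⟨c, hcm, hviz⟩ := List.mem_flatMap.mp hfm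
        exact pvReach.step (hre c hcm) hviz hg

lemma pvRound_grow {g : List (List Int)} {pedra ncol nlin : Int}
    {st : PySem.Set (Int × Int) × Bool}
    (hst : st.2 = false) (hne : (pvRound g pedra ncol nlin st).2 = false) :
    st.1.length + 1 ≤ (pvRound g pedra ncol nlin st).1.length := by
  unfold pvRound at hne ⊢
  rw [hst] at hne ⊢
  simp only [Bool.false_eq_true, if_false] at hne ⊢
  by_cases hsub : PySem.Set.issubset
      (PySem.Set.ofList ((st.1.flatMap pvViz).filter (pvGood g pedra ncol nlin))) st.1 = true
  · rw [if_pos hsub] at hne; simp at hne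
  · rw [if_neg hsub]
    set novos := PySem.Set.ofList ((st.1.flatMap pvViz).filter (pvGood g pedra ncol nlin)) with hn
    obtain ⟨y, hyn, hyv⟩ : ∃ y ∈ novos, y ∉ st.1 := by
      by_contra hall
      rw [not_exists] at hall
      simp only [not_and, not_not] at hall
      exact hsub ((PySem.Set.issubset_iff _ _).mpr hall)
    rw [PySem.Set.update_eq_append_filter]
    have hyf : y ∈ (PySem.Set.ofList novos).filter (fun z => !st.1.contains z) := by
      refine List.mem_filter.mpr ⟨?_, ?_⟩
      · rw [PySem.Set.ofList_ofList]; exact hyn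
      · simp [hyv]
    have := List.length_pos_of_mem hyf
    simp only [List.length_append]
    omega

lemma pvIter_inv {g : List (List Int)} {pedra ncol nlin : Int} {s : Int × Int} (k : Nat)
    {st : PySem.Set (Int × Int) × Bool}
    (h : pvBInv (pvGood g pedra ncol nlin) s st) :
    pvBInv (pvGood g pedra ncol nlin) s ((pvRound g pedra ncol nlin)^[k] st) := by
  induction k generalizing st with
  | zero => simpa using h
  | succ k ih => rw [Function.iterate_succ_apply]; exact ih (pvRound_inv h).1

lemma pvIter_grow {g : List (List Int)} {pedra ncol nlin : Int} (k : Nat)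
    {st : PySem.Set (Int × Int) × Bool}
    (hst : st.2 = false) (hne : ((pvRound g pedra ncol nlin)^[k] st).2 = false) :
    st.1.length + k ≤ ((pvRound g pedra ncol nlin)^[k] st).1.length := by
  induction k generalizing st with
  | zero => simp
  | succ k ih =>
    rw [Function.iterate_succ_apply] at hne ⊢
    by_cases hflag : (pvRound g pedra ncol nlin st).2 = true
    · exfalso
      have hiter : ∀ m, (pvRound g pedra ncol nlin)^[m] (pvRound g pedra ncol nlin st)
          = pvRound g pedra ncol nlin st := by
        intro m
        induction m with
        | zero => rfl
        | succ m ihm => rw [Function.iterate_succ_apply, pvRound_of_done hflag, ihm]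
      rw [hiter k, hflag] at hne
      exact Bool.true_eq_false.mp hne
    · have hflag' : (pvRound g pedra ncol nlin st).2 = false := Bool.eq_false_iff.mpr hflag
      have h1 := pvRound_grow hst hflag'
      have h2 := ih hflag'
      specialize h2 hne
      omega

lemma pvB_char (g : List (List Int)) (pedra ncol nlin : Int) (s : Int × Int)
    (cells : List (Int × Int))
    (hc : ∀ c, pvGood g pedra ncol nlin c = true → c ∈ cells)
    (N : Nat) (hN : cells.length ≤ N) :
    (((pvRound g pedra ncol nlin)^[N] ([s], false)).1.Nodup) ∧
    (∀ x, x ∈ ((pvRound g pedra ncol nlin)^[N] ([s], false)).1 ↔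
      pvReach (pvGood g pedra ncol nlin) s x) := by
  have hInv : pvBInv (pvGood g pedra ncol nlin) s ((pvRound g pedra ncol nlin)^[N] ([s], false)) :=
    pvIter_inv N ⟨by simp, by simp, by
      intro x hx; rw [List.mem_singleton.mp hx]; exact pvReach.base, by simp⟩
  obtain ⟨hnd, hs, hre, hfl⟩ := hInv
  have hclosed : pvClosed (pvGood g pedra ncol nlin)
      ((pvRound g pedra ncol nlin)^[N] ([s], false)).1 := by
    by_cases hflag : ((pvRound g pedra ncol nlin)^[N] ([s], false)).2 = true
    · exact hfl hflag
    · have hflag' : ((pvRound g pedra ncol nlin)^[N] ([s], false)).2 = false :=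
        Bool.eq_false_iff.mpr hflag
      have hlen := pvIter_grow N (st := (([s], false) : PySem.Set (Int × Int) × Bool)) rfl hflag'
      simp only [List.length_singleton] at hlen
      -- with no stable round in N steps the visited set must already contain every eligible cell
      have hfull : ∀ c, pvGood g pedra ncol nlin c = true →
          c ∈ ((pvRound g pedra ncol nlin)^[N] ([s], false)).1 := by
        intro c hcg
        by_contra hcnot
        have hsubT : ((pvRound g pedra ncol nlin)^[N] ([s], false)).1
            ⊆ (PySem.Set.ofList (s :: cells)).erase c := by
          intro x hx
          have hxT : x ∈ PySem.Set.ofList (s :: cells) := by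
            refine (PySem.Set.mem_ofList _ _).mpr ?_
            rcases pvReach_cases (hre x hx) with h | h
            · exact h ▸ List.mem_cons_self
            · exact List.mem_cons_of_mem _ (hc x h)
          have hxc : x ≠ c := fun he => hcnot (he ▸ hx)
          exact (List.mem_erase_of_ne hxc).mpr hxT
        have h1 : ((pvRound g pedra ncol nlin)^[N] ([s], false)).1.length
            ≤ ((PySem.Set.ofList (s :: cells)).erase c).length :=
          pvNodup_length_le hnd hsubT
        have hcinT : c ∈ PySem.Set.ofList (s :: cells) :=
          (PySem.Set.mem_ofList _ _).mpr (List.mem_cons_of_mem _ (hc c hcg))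
        have h2 : ((PySem.Set.ofList (s :: cells)).erase c).length
            = (PySem.Set.ofList (s :: cells)).length - 1 := List.length_erase_of_mem hcinT
        have h3 : (PySem.Set.ofList (s :: cells)).length ≤ (s :: cells).length :=
          PySem.Set.length_ofList_le _
        simp only [List.length_cons] at h3
        omega
      intro x hx nb hnb hg
      exact hfull nb hg
  exact ⟨hnd, fun x => ⟨hre x, fun hr => pvReach_mem_of_closed hr hs hclosed⟩⟩

-- a fold that ignores the list elements is an iterate
lemma pvFoldl_const {α β : Type} (F : β → β) (l : List α) (init : β) :
    l.foldl (fun st _ => F st) init = F^[l.length] init := by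
  induction l generalizing init with
  | nil => rfl
  | cons x t ih => simp [List.foldl_cons, ih, Function.iterate_succ_apply]

-- the board cells
def pvCells (ncol nlin : Int) : List (Int × Int) :=
  (PySem.List.pyRange 0 ncol 1).flatMap (fun a => (PySem.List.pyRange 0 nlin 1).map (fun b => (a, b)))

lemma mem_pvCells {ncol nlin : Int} {c : Int × Int} :
    c ∈ pvCells ncol nlin ↔ (0 ≤ c.1 ∧ c.1 < ncol ∧ 0 ≤ c.2 ∧ c.2 < nlin) := by
  obtain ⟨a, b⟩ := c
  simp [pvCells, List.mem_flatMap, PySem.List.mem_pyRange_one]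
  aesop

lemma nodup_pvCells (ncol nlin : Int) : (pvCells ncol nlin).Nodup :=
  List.Nodup.product (PySem.List.nodup_pyRange_one 0 ncol) (PySem.List.nodup_pyRange_one 0 nlin)

lemma length_pvCells (ncol nlin : Int) : (pvCells ncol nlin).length = ncol.toNat * nlin.toNat := by
  simp [pvCells, List.length_flatMap, PySem.List.length_pyRange_one]

lemma pvGood_mem_cells {g : List (List Int)} {pedra ncol nlin : Int} :
    ∀ c, pvGood g pedra ncol nlin c = true → c ∈ pvCells ncol nlin := by
  intro c hg
  have hd : pvDentro ncol nlin c = true := by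
    unfold pvGood at hg
    exact (Bool.and_eq_true_iff.mp hg).1
  unfold pvDentro at hd
  simp only [Bool.and_eq_true, decide_eq_true_eq] at hd
  exact mem_pvCells.mpr ⟨hd.1.1.1, hd.1.1.2, hd.1.2, hd.2⟩

-- sorted2 with linearly ordered keys is sorted by the lexicographic pair key
lemma pvSorted2_int_str {α : Type} (xs : List α) (k1 : α → Int) (k2 : α → String) :
    PySem.List.sorted2 xs k1 k2 = PySem.List.sorted xs (fun a => toLex (k1 a, k2 a)) := by
  rw [PySem.List.sorted_eq_foldl_insertBy]
  unfold PySem.List.sorted2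
  simp only []
  congr 1
  funext acc x
  congr 1
  funext a b
  have hiff : (toLex (k1 a, k2 a) < toLex (k1 b, k2 b)) ↔
      (k1 a < k1 b ∨ (¬ k1 b < k1 a ∧ k2 a < k2 b)) := by
    rw [Prod.Lex.lt_iff]
    simp only [ofLex_toLex]
    constructor
    · rintro (h | ⟨he, h2⟩)
      · exact Or.inl h
      · exact Or.inr ⟨by rw [he]; simp, h2⟩
    · rintro (h | ⟨hn, h2⟩)
      · exact Or.inl h
      · by_cases h1 : k1 a < k1 b
        · exact Or.inl h1
        · exact Or.inr ⟨le_antisymm (not_lt.mp hn) (not_lt.mp h1), h2⟩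
  by_cases h1 : k1 a < k1 b <;> by_cases h2 : k1 b < k1 a <;> by_cases h3 : k2 a < k2 b <;>
    simp [h1, h2, h3, hiff]

lemma pvOrdena_perm {l1 l2 : List (String × Int)} (h : l1.Perm l2) :
    ordena_intersecoes l1 = ordena_intersecoes l2 := by
  unfold ordena_intersecoes
  rw [pvSorted2_int_str l1, pvSorted2_int_str l2]
  refine PySem.List.sorted_eq_sorted_of_perm _ _ _ ?_ h
  intro a b hab
  have := congrArg (fun x : Lex (Int × String) => (ofLex x)) hab
  simp only [ofLex_toLex] at this
  exact Prod.ext (congrArg Prod.snd this) (congrArg Prod.fst this)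

-- the two visited sets have the same members, hence the two results coincide
lemma pv_main (g : List (List Int)) (i : String × Int) :
    obtem_cadeia g i = obtem_cadeia_alt g i := by
  have hcast : (((g.length : Int)) * ((g.headD []).length : Int)).toNat
      = g.length * (g.headD []).length := by
    rw [← Nat.cast_mul, Int.toNat_natCast]
  have hlen : (pvCells (g.length : Int) ((g.headD []).length : Int)).length
      = g.length * (g.headD []).length := by
    rw [length_pvCells, Int.toNat_natCast, Int.toNat_natCast]
  obtain ⟨hAnd, hAmem⟩ := pvALoop_char g i (g.length : Int) ((g.headD []).length : Int)
    (pvCells (g.length : Int) ((g.headD []).length : Int)) (nodup_pvCells _ _) pvGood_mem_cells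
    (pvOrd (obtem_col i) - 65, obtem_lin i - 1)
    ((((g.length : Int)) * ((g.headD []).length : Int)).toNat + 1) (by omega)
  obtain ⟨hBnd, hBmem⟩ := pvB_char g (obtem_pedra g i) (g.length : Int) ((g.headD []).length : Int)
    (pvOrd (obtem_col i) - 65, obtem_lin i - 1)
    (pvCells (g.length : Int) ((g.headD []).length : Int)) pvGood_mem_cells
    ((((g.length : Int)) * ((g.headD []).length : Int)).toNat) (by omega)
  have hfold : (PySem.List.pyRange 0 (((g.length : Int)) * ((g.headD []).length : Int)) 1).foldl
      (fun st _ => pvRound g (obtem_pedra g i) (g.length : Int) ((g.headD []).length : Int) st)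
      ([(pvOrd (obtem_col i) - 65, obtem_lin i - 1)], false)
      = (pvRound g (obtem_pedra g i) (g.length : Int) ((g.headD []).length : Int))^[
          (((g.length : Int)) * ((g.headD []).length : Int)).toNat]
        ([(pvOrd (obtem_col i) - 65, obtem_lin i - 1)], false) := by
    rw [pvFoldl_const, PySem.List.length_pyRange_one, sub_zero]
  have hperm : (pvALoop g i (g.length : Int) ((g.headD []).length : Int)
        ((((g.length : Int)) * ((g.headD []).length : Int)).toNat + 1)
        [(pvOrd (obtem_col i) - 65, obtem_lin i - 1)]
        [(pvOrd (obtem_col i) - 65, obtem_lin i - 1)]).Perm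
      (((pvRound g (obtem_pedra g i) (g.length : Int) ((g.headD []).length : Int))^[
          (((g.length : Int)) * ((g.headD []).length : Int)).toNat]
        ([(pvOrd (obtem_col i) - 65, obtem_lin i - 1)], false)).1) :=
    (List.perm_ext_iff_of_nodup hAnd hBnd).mpr (fun a => (hAmem a).trans (hBmem a).symm)
  show ordena_intersecoes _ = ordena_intersecoes _
  apply pvOrdena_perm
  apply List.Perm.map
  refine (PySem.List.sorted2_perm _ _ _ _).trans (.trans ?_ (PySem.List.sorted2_perm _ _ _ _).symm)
  rw [hfold]
  exact hperm

-- ===== VERDICT (by name: the statement is the Claim_ definition above) =====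
theorem obtem_cadeia_spec : Claim_equal_obtem_cadeia := by
  intro g i _ _
  unfold Spec_obtem_cadeia
  exact pv_main g i
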